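-- pv_equiv track=rewrite | github.com/sy159/invite_code | utils.py | id_to_code
-- ===== SOURCE A (Python) =====
-- CHARS = ['5', 'd', 'f', 'u', 'c', 'y', 'a', 'r', '1', 'j',
--          '2', 't', 'x', 'w', 'g', 's', '8', 'm', 'v', 'p',
--          '4', 'q', 'h', 'b', '3', 'n', '6', 'k', '7', 'e',
--          'z', '9']
--
-- CHAR_LEN = len(CHARS)
--
-- DIVIDER = 'i'  # 分割标识(区分补位，应该是chars里面没出现的字符)
--
-- def id_to_code(from_id: int, min_length: int = 6) -> str:
--     code = ""
--     try:
--         from_id = int(from_id)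
--         while from_id // CHAR_LEN > 0:
--             code += CHARS[from_id % CHAR_LEN]  # 通过余数获取索引位置生成码
--             from_id = from_id // CHAR_LEN
--         code += CHARS[from_id % CHAR_LEN]  # 处理未除尽的余数
--         code = code[::-1]
--         fix_len = min_length - len(code)  # 需要补码的长度
--         if fix_len > 0:
--             code += DIVIDER
--             for i in range(fix_len - 1):
--                 code += CHARS[i]
--     except Exception as e:
--         pass
--     return code
-- ===== SOURCE B (Python) =====
-- # B: recursive most-significant-first encoding (no reverse) and slice-based padding
-- # instead of A's while-loop + [::-1] + char-by-char padding loop.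
-- CHARS = ['5', 'd', 'f', 'u', 'c', 'y', 'a', 'r', '1', 'j',
--          '2', 't', 'x', 'w', 'g', 's', '8', 'm', 'v', 'p',
--          '4', 'q', 'h', 'b', '3', 'n', '6', 'k', '7', 'e',
--          'z', '9']
--
-- CHAR_LEN = len(CHARS)
--
-- DIVIDER = 'i'
--
--
-- def _encode(n):
--     if n // CHAR_LEN > 0:
--         return _encode(n // CHAR_LEN) + CHARS[n % CHAR_LEN]
--     return CHARS[n % CHAR_LEN]
--
--
-- def id_to_code(from_id: int, min_length: int = 6) -> str:
--     try:
--         n = int(from_id)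
--     except Exception:
--         return ""
--     code = _encode(n)
--     fix_len = min_length - len(code)
--     if fix_len > 0:
--         code += DIVIDER + ''.join(CHARS[:fix_len - 1])
--     return code
-- ===== Notes on version B (the rewrite author's own statement) =====
-- stated objective: simpler
-- what changed: Replace A's while-loop that accumulates digits least-significant-first and then reverses with [::-1], plus a char-by-char padding for-loop that relies on a caught IndexError, by a most-significant-first recursive encoder (no reversal) and a single clamped slice CHARS[:fix_len-1] for the padding.
import Mathlib
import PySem

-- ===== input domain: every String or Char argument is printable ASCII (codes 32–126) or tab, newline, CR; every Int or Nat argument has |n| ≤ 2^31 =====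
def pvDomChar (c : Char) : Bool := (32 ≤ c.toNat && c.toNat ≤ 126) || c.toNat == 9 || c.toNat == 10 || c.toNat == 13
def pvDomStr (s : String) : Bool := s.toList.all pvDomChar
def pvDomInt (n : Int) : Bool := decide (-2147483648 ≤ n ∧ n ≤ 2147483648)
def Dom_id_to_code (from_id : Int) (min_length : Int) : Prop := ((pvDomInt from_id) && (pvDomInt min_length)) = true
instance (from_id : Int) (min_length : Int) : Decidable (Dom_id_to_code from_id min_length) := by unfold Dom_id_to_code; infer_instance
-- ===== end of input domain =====

-- B replaces A's while-loop + [::-1] + char-by-char padding loop by a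
-- most-significant-digit-first recursion and a single slice (objective: simpler).

-- ===== PORT A =====
def pvCHARS : List Char :=
  ['5', 'd', 'f', 'u', 'c', 'y', 'a', 'r', '1', 'j',
   '2', 't', 'x', 'w', 'g', 's', '8', 'm', 'v', 'p',
   '4', 'q', 'h', 'b', '3', 'n', '6', 'k', '7', 'e',
   'z', '9']

-- CHARS[n % CHAR_LEN]: the index is Python's n % 32, always in [0, 32), so the
-- IndexError branch of pyGet? is unreachable; getD supplies a never-used default.
def pvCharAt (n : Int) : Char := (PySem.List.pyGet? pvCHARS (PySem.Int.mod n 32)).getD ' '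

-- the while loop: appends CHARS[from_id % 32] while from_id // 32 > 0
def pvLoopA (code : List Char) (n : Int) : List Char × Int :=
  if 0 < PySem.Int.floordiv n 32 then
    pvLoopA (code ++ [pvCharAt n]) (PySem.Int.floordiv n 32)
  else (code, n)
termination_by n.toNat
decreasing_by
  rename_i h
  rw [PySem.Int.floordiv_eq_ediv_of_pos (by omega : (0:Int) < 32)] at h ⊢
  omega

-- the padding for-loop: for i in range(stop): code += CHARS[i]; i ≥ 32 raises
-- IndexError, caught by the blanket except, which returns the code built so far.
def pvPadA (code : List Char) (i : Nat) (stop : Int) : List Char :=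
  if (i : Int) < stop then
    match PySem.List.pyGet? pvCHARS (i : Int) with
    | none => code           -- IndexError → except → return code as built
    | some c => pvPadA (code ++ [c]) (i + 1) stop
  else code
termination_by (stop - i).toNat
decreasing_by omega

def id_to_code (from_id : Int) (min_length : Int) : String :=
  let p := pvLoopA [] from_id
  let code := p.1 ++ [pvCharAt p.2]
  let code := code.reverse
  let fixLen := min_length - (code.length : Int)
  if 0 < fixLen then String.ofList (pvPadA (code ++ ['i']) 0 (fixLen - 1))
  else String.ofList code

-- ===== PORT B =====
-- _encode: most-significant digit first, no reversal
def pvEncodeB (n : Int) : List Char :=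
  if 0 < PySem.Int.floordiv n 32 then
    pvEncodeB (PySem.Int.floordiv n 32) ++ [pvCharAt n]
  else [pvCharAt n]
termination_by n.toNat
decreasing_by
  rename_i h
  rw [PySem.Int.floordiv_eq_ediv_of_pos (by omega : (0:Int) < 32)] at h ⊢
  omega

def id_to_code_alt (from_id : Int) (min_length : Int) : String :=
  let code := pvEncodeB from_id
  let fixLen := min_length - (code.length : Int)
  if 0 < fixLen then
    String.ofList (code ++ ['i'] ++ PySem.List.slice pvCHARS none (some (fixLen - 1)))
  else String.ofList code

-- ===== PRECONDITION & SPEC =====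
def Spec_id_to_code (from_id : Int) (min_length : Int) (out : String) : Prop := out = id_to_code_alt from_id min_length
instance (from_id : Int) (min_length : Int) (out : String) : Decidable (Spec_id_to_code from_id min_length out) := by unfold Spec_id_to_code; infer_instance

-- ===== CLAIM (what is proved, stated in full; the proofs are below) =====
def Claim_equal_id_to_code : Prop := ∀ (from_id : Int) (min_length : Int), Dom_id_to_code from_id min_length → Spec_id_to_code from_id min_length (id_to_code from_id min_length)

-- ===== LEMMAS AND PROOFS =====

-- A's loop state, continued by the final append, is the reverse of B's encoding.
theorem pvLoopA_encode (code : List Char) (n : Int) :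
    (pvLoopA code n).1 ++ [pvCharAt (pvLoopA code n).2] = code ++ (pvEncodeB n).reverse := by
  fun_induction pvLoopA code n with
  | case1 code n h ih =>
      rw [pvEncodeB, if_pos h]
      simpa using ih
  | case2 code n h =>
      rw [pvEncodeB, if_neg h]
      simp

-- A's padding loop appends CHARS[:stop] (clamped at 32 by the caught IndexError).
theorem pvPadA_take (code : List Char) (i : Nat) (stop : Int) :
    pvPadA code i stop = code ++ (pvCHARS.drop i).take (stop - i).toNat := by
  fun_induction pvPadA code i stop with
  | case1 code i h hget =>
      -- IndexError: i ≥ 32, drop i = []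
      have hge : pvCHARS.length ≤ i := by
        by_contra hlt
        rw [PySem.List.pyGet?_natCast, List.getElem?_eq_getElem (by omega)] at hget
        exact absurd hget (by simp)
      rw [List.drop_eq_nil_of_le hge]
      simp
  | case2 code i h c hget ih =>
      rw [ih]
      rw [PySem.List.pyGet?_natCast] at hget
      have hlt : i < pvCHARS.length := by
        by_contra hge
        simp [List.getElem?_eq_none (by omega : pvCHARS.length ≤ i)] at hget
      rw [List.getElem?_eq_getElem hlt] at hget
      have hc : c = pvCHARS[i] := by injection hget with h'; exact h'.symm
      subst hc
      rw [List.drop_eq_getElem_cons hlt]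
      have hnat : (stop - i).toNat = ((stop - (i+1:Nat)).toNat) + 1 := by push_cast; omega
      rw [hnat, List.take_succ_cons]
      simp
  | case3 code i h =>
      have : (stop - i).toNat = 0 := by omega
      simp [this]

theorem slice_take (b : Int) (hb : 0 ≤ b) :
    PySem.List.slice pvCHARS none (some b) = pvCHARS.take b.toNat := by
  have : b = ((b.toNat : Nat) : Int) := by omega
  rw [this, PySem.List.slice_to_natCast]
  congr 1

-- ===== VERDICT (by name: the statement is the Claim_ definition above) =====
theorem id_to_code_spec : Claim_equal_id_to_code := by
  intro from_id min_length _
  unfold Spec_id_to_code id_to_code id_to_code_alt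
  have hmain : ((pvLoopA [] from_id).1 ++ [pvCharAt (pvLoopA [] from_id).2]).reverse
      = pvEncodeB from_id := by
    rw [pvLoopA_encode]
    simp
  simp only [hmain]
  split_ifs with h
  · rw [pvPadA_take, slice_take _ (by omega)]
    simp
  · rfl
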